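-- pv_equiv track=rewrite | github.com/yannickloth/W33-Theory | scripts/w33_full_decomposition.py | compute_link_homology_for_all_vertices
-- ===== SOURCE A (Python) =====
-- from collections import deque
--
-- def compute_link_homology_for_all_vertices(n, adj):
--     """Verify that link(v) has exactly 4 connected components for all vertices."""
--     results = []
--     for v in range(n):
--         neighbors = adj[v]
--         # Build subgraph on neighbors
--         nb_set = set(neighbors)
--         # Connected components via BFS
--         visited_nb = set()
--         components = 0
--         for u in neighbors:
--             if u not in visited_nb:
--                 components += 1
--                 queue = deque([u])
--                 while queue:
--                     x = queue.popleft()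
--                     if x in visited_nb:
--                         continue
--                     visited_nb.add(x)
--                     for w in adj[x]:
--                         if w in nb_set and w not in visited_nb:
--                             queue.append(w)
--         results.append(components)
--     return results
-- ===== SOURCE B (Python) =====
-- def compute_link_homology_for_all_vertices(n, adj):
--     """Verify that link(v) has exactly 4 connected components for all vertices."""
--     results = []
--     for v in range(n):
--         nb_set = set(adj[v])
--         visited = set()
--         components = 0
--         for u in adj[v]:
--             if u in visited:
--                 continue
--             components += 1
--             # saturate: close visited ∪ {u} under one-step adjacency inside nb_set.
--             # len(nb_set) rounds always reach the fixpoint (each useful round grows the set).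
--             reach = visited | {u}
--             for _ in range(len(nb_set)):
--                 reach = reach | {w for x in reach for w in adj[x] if w in nb_set}
--             visited = reach
--         results.append(components)
--     return results
-- ===== Notes on version B (the rewrite author's own statement) =====
-- stated objective: alternative
-- what changed: Per vertex, the queue-based BFS traversal of the neighbor-induced subgraph is replaced by an order-independent fixpoint saturation: the visited set is repeatedly closed under one-step adjacency inside the neighbor set until (a guaranteed-sufficient |nb_set| rounds of) stabilization, counting the same component restarts.
import Mathlib
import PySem

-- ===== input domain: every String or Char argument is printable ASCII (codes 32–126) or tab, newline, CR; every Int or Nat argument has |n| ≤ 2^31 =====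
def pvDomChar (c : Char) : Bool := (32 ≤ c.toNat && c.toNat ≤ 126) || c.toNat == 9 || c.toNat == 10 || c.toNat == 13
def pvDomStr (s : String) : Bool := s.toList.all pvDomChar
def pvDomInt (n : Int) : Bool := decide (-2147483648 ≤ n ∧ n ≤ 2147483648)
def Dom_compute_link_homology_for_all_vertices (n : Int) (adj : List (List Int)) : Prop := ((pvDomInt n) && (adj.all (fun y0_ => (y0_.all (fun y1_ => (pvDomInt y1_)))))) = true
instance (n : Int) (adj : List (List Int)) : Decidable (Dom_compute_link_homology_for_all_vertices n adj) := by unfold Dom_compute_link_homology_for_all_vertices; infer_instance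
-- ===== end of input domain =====

-- B replaces A's queue-based BFS over each vertex's neighbor-induced subgraph by an
-- order-independent fixpoint saturation of the visited set (alternative algorithm, same values).

-- ===== PORT A =====

-- adj[x]; Pre_ guarantees every index the loops reach is in range, so pyGet? is `some` there
-- (the [] default is never used on admitted inputs).
def pvRow (adj : List (List Int)) (x : Int) : List Int := (PySem.List.pyGet? adj x).getD []

-- the `while queue:` BFS loop of A; the proof argument hq is termination scaffolding only
-- (queue elements always lie in nb, so the measure (unvisited part of nb, queue length) drops).
def pv_countP_lt {l : List Int} {p q : Int → Bool} (himp : ∀ y, p y = true → q y = true)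
    {x : Int} (hx : x ∈ l) (hqx : q x = true) (hpx : p x = false) :
    l.countP p < l.countP q := by
  obtain ⟨s, t, rfl⟩ := List.append_of_mem hx
  have hs := List.countP_mono_left (l := s) (fun a _ h => himp a h)
  have ht := List.countP_mono_left (l := t) (fun a _ h => himp a h)
  simp [List.countP_append, hqx, hpx]
  omega

def pvBFS (adj : List (List Int)) (nb : PySem.Set Int) (visited : PySem.Set Int)
    (queue : List Int) (hq : ∀ x ∈ queue, x ∈ nb) : PySem.Set Int :=
  match queue, hq with
  | [], _ => visited
  | x :: rest, hq =>
    if hx : x ∈ visited then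
      pvBFS adj nb visited rest (fun y hy => hq y (List.mem_cons_of_mem x hy))
    else
      pvBFS adj nb (PySem.Set.add visited x)
        (rest ++ (pvRow adj x).filter (fun w =>
          PySem.Set.contains nb w && !PySem.Set.contains (PySem.Set.add visited x) w))
        (fun y hy => by
          rcases List.mem_append.mp hy with h | h
          · exact hq y (List.mem_cons_of_mem x h)
          · have := (List.mem_filter.mp h).2
            exact (PySem.Set.contains_iff nb y).mp (Bool.and_eq_true_iff.mp this).1)
termination_by (nb.countP (fun y => !decide (y ∈ visited)), queue.length)
decreasing_by
  · exact Prod.Lex.right _ (by simp)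
  · apply Prod.Lex.left
    refine pv_countP_lt (fun y hy => ?_) (hq x List.mem_cons_self) ?_ ?_
    · simp only [Bool.not_eq_eq_eq_not, Bool.not_true, decide_eq_false_iff_not,
        PySem.Set.mem_add] at hy ⊢
      exact fun h => hy (Or.inl h)
    · simp [hx]
    · simp [PySem.Set.mem_add]

-- the `for u in neighbors:` loop of A
def pvLinkA (adj : List (List Int)) (nb : PySem.Set Int) (l : List Int)
    (visited : PySem.Set Int) (comps : Int) (hl : ∀ x ∈ l, x ∈ nb) : Int :=
  match l, hl with
  | [], _ => comps
  | u :: rest, hl =>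
    if u ∈ visited then
      pvLinkA adj nb rest visited comps (fun x hx => hl x (List.mem_cons_of_mem u hx))
    else
      pvLinkA adj nb rest
        (pvBFS adj nb visited [u]
          (fun x hx => by rcases List.mem_singleton.mp hx with rfl; exact hl x List.mem_cons_self))
        (comps + 1) (fun x hx => hl x (List.mem_cons_of_mem u hx))

def compute_link_homology_for_all_vertices (n : Int) (adj : List (List Int)) : List Int :=
  (PySem.List.pyRange 0 n 1).foldl
    (fun results v =>
      results ++ [pvLinkA adj (PySem.Set.ofList (pvRow adj v)) (pvRow adj v) PySem.Set.empty 0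
        (fun x hx => (PySem.Set.mem_ofList (pvRow adj v) x).mpr hx)])
    []

-- ===== PORT B =====

-- one saturation round: reach | {w for x in reach for w in adj[x] if w in nb_set}
def pvSatStep (adj : List (List Int)) (nb reach : PySem.Set Int) : PySem.Set Int :=
  PySem.Set.union reach
    (reach.flatMap (fun x => (pvRow adj x).filter (fun w => PySem.Set.contains nb w)))

-- `for _ in range(len(nb_set)):` — len(nb_set) saturation rounds
def pvSat (adj : List (List Int)) (nb : PySem.Set Int) : Nat → PySem.Set Int → PySem.Set Int
  | 0, reach => reach
  | k + 1, reach => pvSat adj nb k (pvSatStep adj nb reach)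

-- the `for u in adj[v]:` loop of B
def pvLinkB (adj : List (List Int)) (nb : PySem.Set Int) : List Int → PySem.Set Int → Int → Int
  | [], _, comps => comps
  | u :: rest, visited, comps =>
    if u ∈ visited then pvLinkB adj nb rest visited comps
    else pvLinkB adj nb rest (pvSat adj nb nb.length (PySem.Set.union visited [u])) (comps + 1)

def compute_link_homology_for_all_vertices_alt (n : Int) (adj : List (List Int)) : List Int :=
  (PySem.List.pyRange 0 n 1).foldl
    (fun results v =>
      results ++ [pvLinkB adj (PySem.Set.ofList (pvRow adj v)) (pvRow adj v) PySem.Set.empty 0])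
    []

-- ===== PRECONDITION & SPEC =====
-- Pre_ excludes exactly the inputs where Python A raises IndexError: n beyond len(adj), or an
-- entry of one of the first n adjacency rows outside [-len(adj), len(adj)) (every such entry is
-- eventually used as an index adj[x] by the BFS).
def Pre_compute_link_homology_for_all_vertices (n : Int) (adj : List (List Int)) : Prop :=
  n ≤ (adj.length : Int) ∧
    ∀ row ∈ adj.take n.toNat, ∀ x ∈ row, -(adj.length : Int) ≤ x ∧ x < (adj.length : Int)
instance (n : Int) (adj : List (List Int)) : Decidable (Pre_compute_link_homology_for_all_vertices n adj) := by unfold Pre_compute_link_homology_for_all_vertices; infer_instance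

def pvWitness_compute_link_homology_for_all_vertices : Int × List (List Int) :=
  (3, [[1, 2], [0, 2], [0, 1]])

def Spec_compute_link_homology_for_all_vertices (n : Int) (adj : List (List Int)) (out : List Int) : Prop := out = compute_link_homology_for_all_vertices_alt n adj
instance (n : Int) (adj : List (List Int)) (out : List Int) : Decidable (Spec_compute_link_homology_for_all_vertices n adj out) := by unfold Spec_compute_link_homology_for_all_vertices; infer_instance

-- ===== CLAIM (what is proved, stated in full; the proofs are below) =====
def Claim_equal_compute_link_homology_for_all_vertices : Prop := ∀ (n : Int) (adj : List (List Int)), Dom_compute_link_homology_for_all_vertices n adj → Pre_compute_link_homology_for_all_vertices n adj → Spec_compute_link_homology_for_all_vertices n adj (compute_link_homology_for_all_vertices n adj)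

-- ===== LEMMAS AND PROOFS =====

-- directed reachability inside the neighbor set nb, starting from the set S
inductive pvReach (adj : List (List Int)) (nb : List Int) (S : Int → Prop) : Int → Prop
  | base (x : Int) : S x → pvReach adj nb S x
  | step (x w : Int) : pvReach adj nb S x → w ∈ pvRow adj x → w ∈ nb → pvReach adj nb S w

theorem pvReach_bind {adj : List (List Int)} {nb : List Int} {S T : Int → Prop} {y : Int}
    (h : pvReach adj nb S y) (hST : ∀ z, S z → pvReach adj nb T z) : pvReach adj nb T y := by
  induction h with
  | base x hx => exact hST x hx
  | step x w _ hw hwnb ih => exact pvReach.step x w ih hw hwnb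

theorem pvReach_exists {adj : List (List Int)} {nb : List Int} {S : Int → Prop} {y : Int}
    (h : pvReach adj nb S y) : ∃ z, S z := by
  induction h with
  | base x hx => exact ⟨x, hx⟩
  | step _ _ _ _ _ ih => exact ih

theorem pvReach_closedUpto {adj : List (List Int)} {nb : List Int} {V Q : Int → Prop}
    (hV : ∀ a, V a → ∀ w, w ∈ pvRow adj a → w ∈ nb → V w ∨ Q w) {y : Int}
    (h : pvReach adj nb (fun z => V z ∨ Q z) y) : V y ∨ pvReach adj nb Q y := by
  induction h with
  | base x hx => exact hx.imp id (pvReach.base x)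
  | step x w _ hw hwnb ih =>
    rcases ih with hx | hx
    · exact (hV x hx w hw hwnb).imp id (pvReach.base w)
    · exact Or.inr (pvReach.step x w hx hw hwnb)

-- a set closed under one-step adjacency inside nb absorbs all reachability
theorem pv_closed_reach {adj : List (List Int)} {nb : List Int} {S : Int → Prop}
    {T : PySem.Set Int}
    (hT : ∀ a ∈ T, ∀ w, w ∈ pvRow adj a → w ∈ nb → w ∈ T)
    (hS : ∀ z, S z → z ∈ T) {y : Int} (h : pvReach adj nb S y) : y ∈ T := by
  induction h with
  | base x hx => exact hS x hx
  | step x w _ hw hwnb ih => exact hT x ih w hw hwnb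

-- characterization of A's BFS loop: it adds exactly the nodes reachable from the queue
theorem pvBFS_mem (adj : List (List Int)) (nb : PySem.Set Int) (visited : PySem.Set Int)
    (queue : List Int) (hq : ∀ x ∈ queue, x ∈ nb) :
    (∀ a ∈ visited, ∀ w, w ∈ pvRow adj a → w ∈ nb → w ∈ visited ∨ w ∈ queue) →
    ∀ y, (y ∈ pvBFS adj nb visited queue hq ↔
      (y ∈ visited ∨ pvReach adj nb (fun z => z ∈ queue) y)) := by
  fun_induction pvBFS adj nb visited queue hq with
  | case1 visited h =>
    intro _ y
    constructor
    · exact Or.inl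
    · rintro (h | h)
      · exact h
      · obtain ⟨z, hz⟩ := pvReach_exists h
        simp at hz
  | case2 visited x rest hq hx hq2 ih =>
    intro hinv y
    have hinv' : ∀ a ∈ visited, ∀ w ∈ pvRow adj a, w ∈ nb → w ∈ visited ∨ w ∈ rest := by
      intro a ha w hw hwnb
      rcases hinv a ha w hw hwnb with h | h
      · exact Or.inl h
      · rcases List.mem_cons.mp h with rfl | h
        · exact Or.inl hx
        · exact Or.inr h
    rw [ih hinv' y]
    constructor
    · rintro (h | h)
      · exact Or.inl h
      · exact Or.inr (pvReach_bind h (fun z hz => pvReach.base z (List.mem_cons_of_mem x hz)))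
    · rintro (h | h)
      · exact Or.inl h
      · have hmono : pvReach adj nb (fun z => z ∈ visited ∨ z ∈ rest) y :=
          pvReach_bind h (fun z hz => pvReach.base z (by
            rcases List.mem_cons.mp hz with rfl | h'
            · exact Or.inl hx
            · exact Or.inr h'))
        exact pvReach_closedUpto hinv' hmono
  | case3 visited x rest hq hx hq2 ih =>
    intro hinv y
    set F : List Int :=
      List.filter (fun w => nb.contains w && !(visited.add x).contains w) (pvRow adj x) with hF
    have hxnb : x ∈ nb := hq x List.mem_cons_self
    have hinv' : ∀ a ∈ visited.add x, ∀ w ∈ pvRow adj a, w ∈ nb →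
        w ∈ visited.add x ∨ w ∈ rest ++ F := by
      intro a ha w hw hwnb
      rcases (PySem.Set.mem_add visited x a).mp ha with ha | rfl
      · rcases hinv a ha w hw hwnb with h | h
        · exact Or.inl ((PySem.Set.mem_add visited x w).mpr (Or.inl h))
        · rcases List.mem_cons.mp h with rfl | h
          · exact Or.inl ((PySem.Set.mem_add visited w w).mpr (Or.inr rfl))
          · exact Or.inr (List.mem_append.mpr (Or.inl h))
      · by_cases hwv : w ∈ visited.add a
        · exact Or.inl hwv
        · refine Or.inr (List.mem_append.mpr (Or.inr ?_))
          refine List.mem_filter.mpr ⟨hw, ?_⟩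
          simp only [Bool.and_eq_true, Bool.not_eq_eq_eq_not, Bool.not_true]
          constructor
          · exact (PySem.Set.contains_iff nb w).mpr hwnb
          · rw [← Bool.not_eq_true]
            exact fun hc => hwv ((PySem.Set.contains_iff _ w).mp hc)
    rw [ih hinv' y]
    constructor
    · rintro (h | h)
      · rcases (PySem.Set.mem_add visited x y).mp h with h | rfl
        · exact Or.inl h
        · exact Or.inr (pvReach.base y List.mem_cons_self)
      · refine Or.inr (pvReach_bind h (fun z hz => ?_))
        rcases List.mem_append.mp hz with hz | hz
        · exact pvReach.base z (List.mem_cons_of_mem x hz)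
        · have hzf := List.mem_filter.mp hz
          have hznb : z ∈ nb := by
            have := (Bool.and_eq_true_iff.mp hzf.2).1
            exact (PySem.Set.contains_iff nb z).mp this
          exact pvReach.step x z (pvReach.base x List.mem_cons_self) hzf.1 hznb
    · rintro (h | h)
      · exact Or.inl ((PySem.Set.mem_add visited x y).mpr (Or.inl h))
      · have hmono : pvReach adj nb (fun z => z ∈ visited.add x ∨ z ∈ rest ++ F) y :=
          pvReach_bind h (fun z hz => pvReach.base z (by
            rcases List.mem_cons.mp hz with rfl | h'
            · exact Or.inl ((PySem.Set.mem_add visited z z).mpr (Or.inr rfl))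
            · exact Or.inr (List.mem_append.mpr (Or.inl h'))))
        exact pvReach_closedUpto hinv' hmono

-- membership in one saturation round of B
theorem pvSatStep_mem (adj : List (List Int)) (nb R : PySem.Set Int) (y : Int) :
    y ∈ pvSatStep adj nb R ↔ (y ∈ R ∨ ∃ x ∈ R, y ∈ pvRow adj x ∧ y ∈ nb) := by
  simp [pvSatStep, PySem.Set.mem_union, List.mem_flatMap, List.mem_filter]

theorem pvSat_subset (adj : List (List Int)) (nb : PySem.Set Int) (k : Nat) :
    ∀ (R : PySem.Set Int) (y : Int), y ∈ R → y ∈ pvSat adj nb k R := by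
  induction k with
  | zero => intro R y hy; exact hy
  | succ k ih =>
    intro R y hy
    exact ih _ y ((pvSatStep_mem adj nb R y).mpr (Or.inl hy))

theorem pvSat_congr (adj : List (List Int)) (nb : PySem.Set Int) (k : Nat) :
    ∀ (R R' : PySem.Set Int), (∀ y, y ∈ R ↔ y ∈ R') →
      ∀ y, (y ∈ pvSat adj nb k R ↔ y ∈ pvSat adj nb k R') := by
  induction k with
  | zero => intro R R' h y; exact h y
  | succ k ih =>
    intro R R' h y
    refine ih _ _ (fun z => ?_) y
    rw [pvSatStep_mem, pvSatStep_mem]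
    constructor
    · rintro (hz | ⟨x, hx, h1, h2⟩)
      · exact Or.inl ((h z).mp hz)
      · exact Or.inr ⟨x, (h x).mp hx, h1, h2⟩
    · rintro (hz | ⟨x, hx, h1, h2⟩)
      · exact Or.inl ((h z).mpr hz)
      · exact Or.inr ⟨x, (h x).mpr hx, h1, h2⟩

-- soundness: saturation only produces old-visited nodes or nodes reachable from the starts
theorem pvSat_sound (adj : List (List Int)) (nb VB : PySem.Set Int) (S : Int → Prop)
    (hcl : ∀ a ∈ VB, ∀ w, w ∈ pvRow adj a → w ∈ nb → w ∈ VB) (k : Nat) :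
    ∀ (R : PySem.Set Int), (∀ z ∈ R, z ∈ VB ∨ pvReach adj nb S z) →
      ∀ y, y ∈ pvSat adj nb k R → (y ∈ VB ∨ pvReach adj nb S y) := by
  induction k with
  | zero => intro R hR y hy; exact hR y hy
  | succ k ih =>
    intro R hR y hy
    refine ih _ (fun z hz => ?_) y hy
    rcases (pvSatStep_mem adj nb R z).mp hz with hz | ⟨x, hx, h1, h2⟩
    · exact hR z hz
    · rcases hR x hx with hx' | hx'
      · exact Or.inl (hcl x hx' z h1 h2)
      · exact Or.inr (pvReach.step x z hx' h1 h2)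

-- completeness core (pigeonhole on nb): after enough rounds the result is closed
theorem pvSat_closed (adj : List (List Int)) (nb : PySem.Set Int) (k : Nat) :
    ∀ (R : PySem.Set Int), nb.length ≤ k + nb.countP (fun y => decide (y ∈ R)) →
      ∀ a ∈ pvSat adj nb k R, ∀ w, w ∈ pvRow adj a → w ∈ nb → w ∈ pvSat adj nb k R := by
  induction k with
  | zero =>
    intro R hcount a _ w _ hwnb
    have hle : nb.countP (fun y => decide (y ∈ R)) ≤ nb.length := List.countP_le_length
    have heq : nb.countP (fun y => decide (y ∈ R)) = nb.length := le_antisymm hle (by omega)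
    simpa using List.countP_eq_length.mp heq w hwnb
  | succ k ih =>
    intro R hcount
    by_cases hstab : ∀ y, y ∈ pvSatStep adj nb R ↔ y ∈ R
    · have hiter : ∀ j y, y ∈ pvSat adj nb j R ↔ y ∈ R := by
        intro j
        induction j with
        | zero => exact fun y => Iff.rfl
        | succ j ihj =>
          intro y
          have h1 : y ∈ pvSat adj nb (j + 1) R ↔ y ∈ pvSat adj nb j R := by
            show y ∈ pvSat adj nb j (pvSatStep adj nb R) ↔ _
            exact pvSat_congr adj nb j _ R hstab y
          exact h1.trans (ihj y)
      intro a ha w hw hwnb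
      have haR : a ∈ R := (hiter (k + 1) a).mp ha
      have hwF : w ∈ pvSatStep adj nb R :=
        (pvSatStep_mem adj nb R w).mpr (Or.inr ⟨a, haR, hw, hwnb⟩)
      exact (hiter (k + 1) w).mpr ((hstab w).mp hwF)
    · push Not at hstab
      obtain ⟨y, hy⟩ := hstab
      have hsub : ∀ z ∈ R, z ∈ pvSatStep adj nb R := fun z hz =>
        (pvSatStep_mem adj nb R z).mpr (Or.inl hz)
      rcases hy with ⟨hyF, hyR⟩ | ⟨hyF, hyR⟩
      swap
      · exact absurd (hsub y hyR) hyF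
      have hynb : y ∈ (nb : List Int) := by
        rcases (pvSatStep_mem adj nb R y).mp hyF with h | ⟨_, _, _, h2⟩
        · exact absurd h hyR
        · exact h2
      have hlt : nb.countP (fun z => decide (z ∈ R)) <
          nb.countP (fun z => decide (z ∈ pvSatStep adj nb R)) := by
        refine pv_countP_lt (fun z hz => ?_) hynb (by simp [hyF]) (by simpa using hyR)
        simp only [decide_eq_true_eq] at hz ⊢
        exact (pvSatStep_mem adj nb R z).mpr (Or.inl hz)
      have := ih (pvSatStep adj nb R) (by omega)
      simpa [pvSat] using this

-- the two per-vertex loops agree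
theorem pv_link_eq (adj : List (List Int)) (nb : PySem.Set Int) :
    ∀ (l : List Int) (VA VB : PySem.Set Int) (c : Int) (hl : ∀ x ∈ l, x ∈ nb)
      (hmem : ∀ y, y ∈ VA ↔ y ∈ VB)
      (hcl : ∀ a ∈ VA, ∀ w, w ∈ pvRow adj a → w ∈ nb → w ∈ VA),
      pvLinkA adj nb l VA c hl = pvLinkB adj nb l VB c := by
  intro l
  induction l with
  | nil => intro VA VB c hl _ _; rfl
  | cons u rest ih =>
    intro VA VB c hl hmem hcl
    by_cases hu : u ∈ VA
    · rw [pvLinkA, pvLinkB, if_pos hu, if_pos ((hmem u).mp hu)]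
      exact ih VA VB c _ hmem hcl
    · have hu' : u ∉ VB := fun h => hu ((hmem u).mpr h)
      rw [pvLinkA, pvLinkB, if_neg hu, if_neg hu']
      -- characterize A's new visited set
      have hA := pvBFS_mem adj nb VA [u]
        (fun x hx => by rcases List.mem_singleton.mp hx with rfl; exact hl x List.mem_cons_self)
        (fun a ha w hw hwnb => Or.inl (hcl a ha w hw hwnb))
      -- characterize B's new visited set
      set R : PySem.Set Int := PySem.Set.union VB [u] with hR
      have hclB : ∀ a ∈ VB, ∀ w, w ∈ pvRow adj a → w ∈ nb → w ∈ VB := fun a ha w hw hwnb =>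
        (hmem w).mp (hcl a ((hmem a).mpr ha) w hw hwnb)
      have hT := pvSat_closed adj nb nb.length R (by omega)
      have hB : ∀ y, y ∈ pvSat adj nb nb.length R ↔
          (y ∈ VB ∨ pvReach adj nb (fun z => z ∈ ([u] : List Int)) y) := by
        intro y
        constructor
        · refine pvSat_sound adj nb VB _ hclB nb.length R (fun z hz => ?_) y
          rcases (PySem.Set.mem_union VB [u] z).mp hz with h | h
          · exact Or.inl h
          · exact Or.inr (pvReach.base z h)
        · rintro (h | h)
          · exact pvSat_subset adj nb nb.length R y ((PySem.Set.mem_union VB [u] y).mpr (Or.inl h))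
          · refine pv_closed_reach hT (fun z hz => ?_) h
            exact pvSat_subset adj nb nb.length R z ((PySem.Set.mem_union VB [u] z).mpr (Or.inr hz))
      refine ih _ _ (c + 1) _ (fun y => (hA y).trans ((or_congr (hmem y) Iff.rfl).trans (hB y).symm)) ?_
      intro a ha w hw hwnb
      rcases (hA a).mp ha with h | h
      · exact (hA w).mpr (Or.inl (hcl a h w hw hwnb))
      · exact (hA w).mpr (Or.inr (pvReach.step a w h hw hwnb))

-- ===== VERDICT (by name: the statement is the Claim_ definition above) =====
theorem compute_link_homology_for_all_vertices_spec : Claim_equal_compute_link_homology_for_all_vertices := by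
  intro n adj _ _
  unfold Spec_compute_link_homology_for_all_vertices
  unfold compute_link_homology_for_all_vertices compute_link_homology_for_all_vertices_alt
  rw [PySem.List.foldl_append_singleton_eq_map, PySem.List.foldl_append_singleton_eq_map]
  refine congrArg _ (List.map_congr_left (fun v _ => ?_))
  exact pv_link_eq adj _ (pvRow adj v) PySem.Set.empty PySem.Set.empty 0 _
    (fun y => Iff.rfl) (by simp [PySem.Set.empty])
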